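-- pv_equiv track=rewrite | github.com/trioskosmos/rabukasim | tools/gen_full_matrix.py | extract_attached_comment_block_above
-- ===== SOURCE A (Python) =====
-- def extract_attached_comment_block_above(lines, start):
--     header_lines = []
--     idx = start - 1
--
--     while idx >= 0 and lines[idx].strip().startswith("#"):
--         idx -= 1
--
--     while idx >= 0:
--         stripped = lines[idx].strip()
--         if not stripped:
--             if header_lines:
--                 break
--             idx -= 1
--             continue
--         if not stripped.startswith("//"):
--             break
--         if "GROUP" in stripped or "====" in stripped:
--             break
--         header_lines.append(stripped)
--         idx -= 1
--
--     header_lines.reverse()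
--     return "\n".join(header_lines)
-- ===== SOURCE B (Python) =====
-- def _dropwhile(pred, xs):
--     while xs and pred(xs[0]):
--         xs = xs[1:]
--     return xs
--
--
-- def _takewhile(pred, xs):
--     out = []
--     for x in xs:
--         if not pred(x):
--             break
--         out.append(x)
--     return out
--
--
-- def extract_attached_comment_block_above(lines, start):
--     rev = [s.strip() for s in lines[:max(start, 0)][::-1]]
--     rev = _dropwhile(lambda s: s.startswith("#"), rev)
--     rev = _dropwhile(lambda s: not s, rev)
--     kept = _takewhile(
--         lambda s: s.startswith("//") and "GROUP" not in s and "====" not in s,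
--         rev)
--     return "\n".join(kept[::-1])
-- ===== Notes on version B (the rewrite author's own statement) =====
-- stated objective: alternative
-- what changed: Replaces A's index-descending stateful loop over the original list with a declarative pipeline over the stripped, reversed prefix: dropwhile '#'-block, dropwhile blanks, takewhile comment lines, then reverse and join.
import Mathlib
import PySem

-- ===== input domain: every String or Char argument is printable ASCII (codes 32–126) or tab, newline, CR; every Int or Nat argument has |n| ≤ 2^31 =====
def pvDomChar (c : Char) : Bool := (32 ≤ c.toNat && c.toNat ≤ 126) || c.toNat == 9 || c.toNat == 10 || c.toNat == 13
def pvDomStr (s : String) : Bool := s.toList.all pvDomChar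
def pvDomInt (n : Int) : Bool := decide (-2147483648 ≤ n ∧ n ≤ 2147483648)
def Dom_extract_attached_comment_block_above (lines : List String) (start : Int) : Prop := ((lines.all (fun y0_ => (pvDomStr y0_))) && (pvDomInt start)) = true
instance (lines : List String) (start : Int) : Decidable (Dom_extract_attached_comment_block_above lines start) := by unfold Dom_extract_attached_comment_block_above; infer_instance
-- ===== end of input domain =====

-- B restates A's single stateful index loop as a three-stage dropwhile/dropwhile/takewhile
-- pipeline over the stripped reversed prefix (objective: alternative decomposition; return value only).

-- ===== PORT A =====
-- first while loop: skip the '#'-block directly above `start`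
def aLoop1 (lines : List String) (idx : Int) : Int :=
  if _h : 0 ≤ idx ∧ PySem.Str.startswith (PySem.Str.strip (PySem.List.pyGetD lines idx "")) "#" = true then
    aLoop1 lines (idx - 1)
  else idx
termination_by (idx + 1).toNat
decreasing_by omega

-- second while loop, with the `header_lines` accumulator
def aLoop2 (lines : List String) (idx : Int) (header : List String) : List String :=
  if h : 0 ≤ idx then
    let stripped := PySem.Str.strip (PySem.List.pyGetD lines idx "")
    if stripped = "" then
      if header ≠ [] then header
      else aLoop2 lines (idx - 1) header
    else if ¬ (PySem.Str.startswith stripped "//" = true) then header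
    else if PySem.Str.isIn "GROUP" stripped || PySem.Str.isIn "====" stripped then header
    else aLoop2 lines (idx - 1) (header ++ [stripped])
  else header
termination_by (idx + 1).toNat
decreasing_by all_goals omega

def extract_attached_comment_block_above (lines : List String) (start : Int) : String :=
  PySem.Str.join "\n" (aLoop2 lines (aLoop1 lines (start - 1)) []).reverse

-- ===== PORT B =====
-- Source B's _dropwhile: while xs and pred(xs[0]): xs = xs[1:]
def bDropwhile (pred : String → Bool) : List String → List String
  | [] => []
  | x :: rest => if pred x then bDropwhile pred rest else x :: rest

-- Source B's _takewhile with its `out` accumulator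
def bTakewhileAux (pred : String → Bool) (xs out : List String) : List String :=
  match xs with
  | [] => out
  | x :: rest => if pred x then bTakewhileAux pred rest (out ++ [x]) else out

def bCommentPred (s : String) : Bool :=
  PySem.Str.startswith s "//" && !(PySem.Str.isIn "GROUP" s) && !(PySem.Str.isIn "====" s)

def extract_attached_comment_block_above_alt (lines : List String) (start : Int) : String :=
  PySem.Str.join "\n"
    (bTakewhileAux bCommentPred
      (bDropwhile (fun s => s == "")
        (bDropwhile (fun s => PySem.Str.startswith s "#")
          ((PySem.List.slice lines none (some (max start 0))).reverse.map PySem.Str.strip)))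
      []).reverse

-- ===== PRECONDITION & SPEC =====
-- A indexes lines[start-1]; it raises IndexError exactly when start > len(lines).
def Pre_extract_attached_comment_block_above (lines : List String) (start : Int) : Prop :=
  start ≤ (lines.length : Int)
instance (lines : List String) (start : Int) : Decidable (Pre_extract_attached_comment_block_above lines start) := by unfold Pre_extract_attached_comment_block_above; infer_instance

def pvWitness_extract_attached_comment_block_above : List String × Int := (["// hi", "x = 1"], 1)

def Spec_extract_attached_comment_block_above (lines : List String) (start : Int) (out : String) : Prop := out = extract_attached_comment_block_above_alt lines start
instance (lines : List String) (start : Int) (out : String) : Decidable (Spec_extract_attached_comment_block_above lines start out) := by unfold Spec_extract_attached_comment_block_above; infer_instance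

-- ===== CLAIM (what is proved, stated in full; the proofs are below) =====
def Claim_equal_extract_attached_comment_block_above : Prop := ∀ (lines : List String) (start : Int), Dom_extract_attached_comment_block_above lines start → Pre_extract_attached_comment_block_above lines start → Spec_extract_attached_comment_block_above lines start (extract_attached_comment_block_above lines start)

-- ===== LEMMAS AND PROOFS =====

-- the stripped, reversed prefix of `lines` up to and including index `idx`
def stripRev (lines : List String) (idx : Int) : List String :=
  ((lines.take (idx + 1).toNat).map PySem.Str.strip).reverse

theorem stripRev_neg (lines : List String) (idx : Int) (h : idx < 0) :
    stripRev lines idx = [] := by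
  unfold stripRev
  have : (idx + 1).toNat = 0 := by omega
  simp [this]

theorem stripRev_cons (lines : List String) (idx : Int)
    (h0 : 0 ≤ idx) (h1 : idx < (lines.length : Int)) :
    stripRev lines idx =
      PySem.Str.strip (PySem.List.pyGetD lines idx "") :: stripRev lines (idx - 1) := by
  unfold stripRev
  have hn : (idx + 1).toNat = idx.toNat + 1 := by omega
  have hlt : idx.toNat < lines.length := by omega
  have ht : lines.take (idx.toNat + 1) = lines.take idx.toNat ++ [lines[idx.toNat]] := by
    rw [List.take_add_one]
    simp [List.getElem?_eq_getElem hlt]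
  have hg : PySem.List.pyGetD lines idx "" = lines[idx.toNat] :=
    PySem.List.pyGetD_eq_getElem lines "" h0 h1
  have hn' : (idx - 1 + 1).toNat = idx.toNat := by omega
  rw [hn, ht, hn', hg]
  simp only [List.map_append, List.map_cons, List.map_nil, List.reverse_append,
    List.reverse_cons, List.reverse_nil, List.nil_append, List.singleton_append]

theorem aLoop1_eq (lines : List String) (idx : Int) (h : idx < (lines.length : Int)) :
    aLoop1 lines idx ≤ idx ∧
    bDropwhile (fun s => PySem.Str.startswith s "#") (stripRev lines idx)
      = stripRev lines (aLoop1 lines idx) := by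
  revert h
  induction idx using aLoop1.induct lines with
  | case1 idx hc ih =>
    intro h
    obtain ⟨h0, hp⟩ := hc
    obtain ⟨ihle, iheq⟩ := ih (by omega)
    rw [stripRev_cons lines idx h0 h]
    rw [aLoop1, dif_pos ⟨h0, hp⟩]
    refine ⟨by omega, ?_⟩
    rw [bDropwhile, if_pos hp, iheq]
  | case2 idx hc =>
    intro h
    rw [aLoop1, dif_neg hc]
    refine ⟨le_refl _, ?_⟩
    by_cases h0 : 0 ≤ idx
    · have hp : ¬ (PySem.Str.startswith (PySem.Str.strip (PySem.List.pyGetD lines idx "")) "#" = true) := by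
        intro hp; exact hc ⟨h0, hp⟩
      rw [stripRev_cons lines idx h0 h, bDropwhile, if_neg hp, ← stripRev_cons lines idx h0 h]
    · rw [stripRev_neg lines idx (by omega), bDropwhile]

theorem bCommentPred_blank : bCommentPred "" = false := by decide

theorem aLoop2_eq_ne (lines : List String) (idx : Int) (h : idx < (lines.length : Int))
    (header : List String) (hh : header ≠ []) :
    aLoop2 lines idx header = bTakewhileAux bCommentPred (stripRev lines idx) header := by
  revert h hh
  induction idx, header using aLoop2.induct lines with
  | case1 idx header h0 s hb hne =>
    intro h hh
    have hb' : PySem.Str.strip (PySem.List.pyGetD lines idx "") = "" := hb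
    rw [aLoop2, dif_pos h0]
    simp only [if_pos hb', if_pos hne]
    rw [stripRev_cons lines idx h0 h, bTakewhileAux, hb', bCommentPred_blank, if_neg (by simp)]
  | case2 idx header h0 s hb hne ih =>
    intro h hh
    exact absurd hh (by simpa using hne)
  | case3 idx header h0 s hb hns =>
    intro h hh
    have hb' : ¬ PySem.Str.strip (PySem.List.pyGetD lines idx "") = "" := hb
    have hns' : ¬ PySem.Str.startswith (PySem.Str.strip (PySem.List.pyGetD lines idx "")) "//" = true := hns
    rw [aLoop2, dif_pos h0]
    simp only [if_neg hb', if_pos hns']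
    rw [stripRev_cons lines idx h0 h, bTakewhileAux]
    have hsw : PySem.Str.startswith (PySem.Str.strip (PySem.List.pyGetD lines idx "")) "//" = false := by
      simpa using hns'
    have hcp : bCommentPred (PySem.Str.strip (PySem.List.pyGetD lines idx "")) = false := by
      simp only [bCommentPred, hsw, Bool.false_and]
    rw [if_neg (by simp only [hcp]; decide)]
  | case4 idx header h0 s hb hns hg =>
    intro h hh
    have hb' : ¬ PySem.Str.strip (PySem.List.pyGetD lines idx "") = "" := hb
    have hns' : ¬¬ PySem.Str.startswith (PySem.Str.strip (PySem.List.pyGetD lines idx "")) "//" = true := hns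
    have hg' : (PySem.Str.isIn "GROUP" (PySem.Str.strip (PySem.List.pyGetD lines idx "")) || PySem.Str.isIn "====" (PySem.Str.strip (PySem.List.pyGetD lines idx ""))) = true := hg
    rw [aLoop2, dif_pos h0]
    simp only [if_neg hb', if_neg hns', if_pos hg']
    rw [stripRev_cons lines idx h0 h, bTakewhileAux]
    have hcp : bCommentPred (PySem.Str.strip (PySem.List.pyGetD lines idx "")) = false := by
      rcases Bool.or_eq_true_iff.mp hg' with hg2 | hg2 <;>
        simp only [bCommentPred, hg2, Bool.not_true, Bool.and_false, Bool.false_and]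
    rw [if_neg (by simp only [hcp]; decide)]
  | case5 idx header h0 s hb hns hg ih =>
    intro h hh
    have hb' : ¬ PySem.Str.strip (PySem.List.pyGetD lines idx "") = "" := hb
    have hns' : ¬¬ PySem.Str.startswith (PySem.Str.strip (PySem.List.pyGetD lines idx "")) "//" = true := hns
    have hg' : ¬ (PySem.Str.isIn "GROUP" (PySem.Str.strip (PySem.List.pyGetD lines idx "")) || PySem.Str.isIn "====" (PySem.Str.strip (PySem.List.pyGetD lines idx ""))) = true := hg
    rw [aLoop2, dif_pos h0]
    simp only [if_neg hb', if_neg hns', if_neg hg']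
    rw [stripRev_cons lines idx h0 h, bTakewhileAux]
    have hsw : PySem.Str.startswith (PySem.Str.strip (PySem.List.pyGetD lines idx "")) "//" = true :=
      not_not.mp hns'
    have hcp : bCommentPred (PySem.Str.strip (PySem.List.pyGetD lines idx "")) = true := by
      simp only [Bool.or_eq_true_iff, not_or] at hg'
      have hG : PySem.Str.isIn "GROUP" (PySem.Str.strip (PySem.List.pyGetD lines idx "")) = false := by
        simpa using hg'.1
      have hE : PySem.Str.isIn "====" (PySem.Str.strip (PySem.List.pyGetD lines idx "")) = false := by
        simpa using hg'.2
      simp only [bCommentPred, hsw, hG, hE, Bool.not_false, Bool.and_self]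
    rw [if_pos hcp]
    exact ih (by omega) (by simp)
  | case6 idx header h0 =>
    intro h hh
    rw [aLoop2, dif_neg h0, stripRev_neg lines idx (by omega), bTakewhileAux]

theorem aLoop2_eq_nil_aux (lines : List String) (n : Nat) :
    ∀ (idx : Int), (idx + 1).toNat ≤ n → idx < (lines.length : Int) →
    aLoop2 lines idx [] =
      bTakewhileAux bCommentPred (bDropwhile (fun s => s == "") (stripRev lines idx)) [] := by
  induction n with
  | zero =>
    intro idx hn h
    have h0 : idx < 0 := by omega
    rw [aLoop2, dif_neg (by omega), stripRev_neg lines idx h0, bDropwhile, bTakewhileAux]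
  | succ n ih =>
    intro idx hn h
    by_cases h0 : 0 ≤ idx
    · rw [stripRev_cons lines idx h0 h]
      by_cases hb : PySem.Str.strip (PySem.List.pyGetD lines idx "") = ""
      · rw [aLoop2, dif_pos h0]
        simp only [if_pos hb, ne_eq, not_true_eq_false]
        have hbeq : (PySem.Str.strip (PySem.List.pyGetD lines idx "") == "") = true := by
          simp [hb]
        rw [bDropwhile, if_pos hbeq]
        exact ih (idx - 1) (by omega) (by omega)
      · have hbeq : ¬ ((PySem.Str.strip (PySem.List.pyGetD lines idx "") == "") = true) := by
          simp [hb]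
        rw [bDropwhile, if_neg hbeq]
        by_cases hns : PySem.Str.startswith (PySem.Str.strip (PySem.List.pyGetD lines idx "")) "//" = true
        · have hns2 : ¬¬ PySem.Str.startswith (PySem.Str.strip (PySem.List.pyGetD lines idx "")) "//" = true :=
            not_not.mpr hns
          by_cases hg : (PySem.Str.isIn "GROUP" (PySem.Str.strip (PySem.List.pyGetD lines idx "")) ||
              PySem.Str.isIn "====" (PySem.Str.strip (PySem.List.pyGetD lines idx ""))) = true
          · rw [aLoop2, dif_pos h0]
            simp only [if_neg hb, if_neg hns2, if_pos hg]
            rw [bTakewhileAux]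
            have hcp : bCommentPred (PySem.Str.strip (PySem.List.pyGetD lines idx "")) = false := by
              rcases Bool.or_eq_true_iff.mp hg with hg2 | hg2 <;>
                simp only [bCommentPred, hg2, Bool.not_true, Bool.and_false, Bool.false_and]
            rw [if_neg (by simp only [hcp]; decide)]
          · rw [aLoop2, dif_pos h0]
            simp only [if_neg hb, if_neg hns2, if_neg hg]
            rw [bTakewhileAux]
            have hcp : bCommentPred (PySem.Str.strip (PySem.List.pyGetD lines idx "")) = true := by
              simp only [Bool.or_eq_true_iff, not_or] at hg
              have hG : PySem.Str.isIn "GROUP" (PySem.Str.strip (PySem.List.pyGetD lines idx "")) = false := by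
                simpa using hg.1
              have hE : PySem.Str.isIn "====" (PySem.Str.strip (PySem.List.pyGetD lines idx "")) = false := by
                simpa using hg.2
              simp only [bCommentPred, hns, hG, hE, Bool.not_false, Bool.and_self]
            rw [if_pos hcp]
            simpa using aLoop2_eq_ne lines (idx - 1) (by omega)
              [PySem.Str.strip (PySem.List.pyGetD lines idx "")] (by simp)
        · rw [aLoop2, dif_pos h0]
          simp only [if_neg hb, if_pos hns]
          rw [bTakewhileAux]
          have hsw : PySem.Str.startswith (PySem.Str.strip (PySem.List.pyGetD lines idx "")) "//" = false := by
            simpa using hns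
          have hcp : bCommentPred (PySem.Str.strip (PySem.List.pyGetD lines idx "")) = false := by
            simp only [bCommentPred, hsw, Bool.false_and]
          rw [if_neg (by simp only [hcp]; decide)]
    · rw [aLoop2, dif_neg h0, stripRev_neg lines idx (by omega), bDropwhile, bTakewhileAux]

theorem aLoop2_eq_nil (lines : List String) (idx : Int) (h : idx < (lines.length : Int)) :
    aLoop2 lines idx [] =
      bTakewhileAux bCommentPred (bDropwhile (fun s => s == "") (stripRev lines idx)) [] :=
  aLoop2_eq_nil_aux lines (idx + 1).toNat idx (le_refl _) h

-- ===== VERDICT (by name: the statement is the Claim_ definition above) =====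
theorem extract_attached_comment_block_above_spec : Claim_equal_extract_attached_comment_block_above := by
  intro lines start _ hpre
  unfold Spec_extract_attached_comment_block_above
  unfold extract_attached_comment_block_above extract_attached_comment_block_above_alt
  have h1 : start - 1 < (lines.length : Int) := by
    unfold Pre_extract_attached_comment_block_above at hpre; omega
  have hrev : (PySem.List.slice lines none (some (max start 0))).reverse.map PySem.Str.strip
      = stripRev lines (start - 1) := by
    rw [PySem.List.slice_to lines (by omega : (0:Int) ≤ max start 0)]
    unfold stripRev
    have : (max start 0).toNat = (start - 1 + 1).toNat := by omega
    rw [this, List.map_reverse]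
  obtain ⟨hle, hdrop⟩ := aLoop1_eq lines (start - 1) h1
  rw [hrev, hdrop, aLoop2_eq_nil lines _ (by omega)]
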